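-- pv_equiv track=rewrite | github.com/naveens800/DSA-practice | small_numbers.py | smaller_than_current
-- ===== SOURCE A (Python) =====
-- def smaller_than_current(nums):
--     temp = sorted(nums)
--     seen = dict()
--     ans = list()
--     for i,n in enumerate(temp):
--         if n not in seen:
--             seen[n] = i
--
--     for n in nums:
--         if n in seen:
--             ans.append(seen[n])
--     return ans
-- ===== SOURCE B (Python) =====
-- def smaller_than_current(nums):
--     # simpler: rank of each element = number of strictly smaller elements
--     return [sum(1 for m in nums if m < n) for n in nums]
-- ===== Notes on version B (the rewrite author's own statement) =====
-- stated objective: simpler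
-- what changed: Replaces the sort plus first-index dictionary with a direct one-line count of strictly smaller elements for each position.
import Mathlib
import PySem

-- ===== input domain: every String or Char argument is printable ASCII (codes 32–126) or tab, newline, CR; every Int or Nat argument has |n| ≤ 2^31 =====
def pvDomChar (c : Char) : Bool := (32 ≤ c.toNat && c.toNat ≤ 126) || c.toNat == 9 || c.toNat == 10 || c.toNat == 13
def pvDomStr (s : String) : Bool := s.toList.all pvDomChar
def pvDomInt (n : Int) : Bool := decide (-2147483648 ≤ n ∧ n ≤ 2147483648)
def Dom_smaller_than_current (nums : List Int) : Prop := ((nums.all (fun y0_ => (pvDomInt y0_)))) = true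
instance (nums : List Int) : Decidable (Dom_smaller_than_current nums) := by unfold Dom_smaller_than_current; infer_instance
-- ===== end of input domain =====

-- B replaces A's sort + first-index dictionary by a direct count of strictly smaller elements (simpler).

-- ===== PORT A =====
def smaller_than_current (nums : List Int) : List Int :=
  let temp := PySem.List.sorted nums (fun x => x) false
  let seen := (PySem.List.enumerate temp 0).foldl
      (fun seen p => if seen.contains p.2 then seen else seen.insert p.2 p.1)
      (PySem.Dict.empty : PySem.Dict Int Int)
  nums.foldl (fun ans n =>
      match seen.get? n with
      | some v => ans ++ [v]
      | none => ans) []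

-- ===== PORT B =====
def smaller_than_current_alt (nums : List Int) : List Int :=
  nums.map (fun n => nums.foldl (fun acc m => if m < n then acc + 1 else acc) (0 : Int))

-- ===== PRECONDITION & SPEC =====
def Spec_smaller_than_current (nums : List Int) (out : List Int) : Prop := out = smaller_than_current_alt nums
instance (nums : List Int) (out : List Int) : Decidable (Spec_smaller_than_current nums out) := by unfold Spec_smaller_than_current; infer_instance

-- ===== CLAIM (what is proved, stated in full; the proofs are below) =====
def Claim_equal_smaller_than_current : Prop := ∀ (nums : List Int), Dom_smaller_than_current nums → Spec_smaller_than_current nums (smaller_than_current nums)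

-- ===== LEMMAS AND PROOFS =====

-- The dict-building loop of A: get? after the fold.
theorem seenFold_get? (temp : List Int) (k : Int) (d : PySem.Dict Int Int) (n : Int) :
    ((PySem.List.enumerate temp k).foldl
      (fun seen p => if seen.contains p.2 then seen else seen.insert p.2 p.1) d).get? n =
    if n ∈ temp ∧ d.contains n = false then some (k + (temp.idxOf n : Nat)) else d.get? n := by
  induction temp generalizing k d with
  | nil => simp
  | cons a t ih =>
    rw [PySem.List.enumerate_cons, List.foldl_cons]
    by_cases hca : d.contains a
    · simp only [hca, if_true]
      rw [ih]
      by_cases hna : n = a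
      · subst hna
        simp [hca]
      · simp only [List.mem_cons, hna, false_or]
        by_cases hnt : n ∈ t
        · by_cases hcn : d.contains n
          · simp [hcn]
          · simp only [hnt, hcn, and_self, if_true, true_and]
            rw [List.idxOf_cons_ne _ (by exact fun h => hna h.symm)]
            push_cast; ring_nf
        · simp [hnt]
    · simp only [hca, Bool.false_eq_true, if_false]
      rw [ih]
      by_cases hna : n = a
      · subst hna
        have hc : (d.insert n k).contains n = true := PySem.Dict.contains_insert_self d n k
        simp only [hc, Bool.true_eq_false, and_false, if_false, PySem.Dict.get?_insert_self]
        have hca' : d.contains n = false := by simpa using hca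
        simp [hca', List.idxOf_cons_self]
      · have hc' : (d.insert a k).contains n = d.contains n := by
          rw [PySem.Dict.contains_insert]
          simp [show (n == a) = false by simp [hna]]
        have hg' : (d.insert a k).get? n = d.get? n :=
          PySem.Dict.get?_insert_of_ne d k hna
        rw [hc', hg']
        simp only [List.mem_cons, hna, false_or]
        by_cases hnt : n ∈ t
        · by_cases hcn : d.contains n
          · simp [hcn]
          · simp only [hnt, hcn, and_self, if_true, true_and]
            rw [List.idxOf_cons_ne _ (by exact fun h => hna h.symm)]
            push_cast; ring_nf
        · simp [hnt]

-- In a ≤-sorted list, the first index of a member equals the number of strictly smaller elements.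
theorem idxOf_sorted_eq_countP (temp : List Int) (hs : temp.Pairwise (· ≤ ·)) (n : Int)
    (hn : n ∈ temp) : temp.idxOf n = temp.countP (fun m => decide (m < n)) := by
  induction temp with
  | nil => cases hn
  | cons a t ih =>
    rcases List.pairwise_cons.mp hs with ⟨ha, ht⟩
    by_cases hna : n = a
    · subst hna
      rw [List.idxOf_cons_self]
      have : t.countP (fun m => decide (m < n)) = 0 := by
        rw [List.countP_eq_zero]
        intro m hm
        simp only [decide_eq_true_eq, not_lt]
        exact ha m hm
      simp [List.countP_cons, this]
    · have hnt : n ∈ t := by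
        rcases List.mem_cons.mp hn with h | h
        · exact absurd h hna
        · exact h
      have han : a < n := lt_of_le_of_ne (ha n hnt) (fun h => hna h.symm)
      rw [List.idxOf_cons_ne _ (fun h => hna h.symm), List.countP_cons]
      simp [ih ht hnt, han]

-- The counting fold of B computes countP (as an Int), from any accumulator.
theorem foldl_count_eq (l : List Int) (n : Int) (acc : Int) :
    l.foldl (fun acc m => if m < n then acc + 1 else acc) acc
      = acc + (l.countP (fun m => decide (m < n)) : Nat) := by
  induction l generalizing acc with
  | nil => simp
  | cons a t ih =>
    rw [List.foldl_cons, List.countP_cons, ih]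
    by_cases h : a < n <;> simp [h] <;> push_cast <;> ring

-- The output loop of A is a map, once every element is found in the dict.
theorem foldl_append_eq_map (l : List Int) (seen : PySem.Dict Int Int) (f : Int → Int)
    (hf : ∀ n ∈ l, seen.get? n = some (f n)) (acc : List Int) :
    l.foldl (fun ans n =>
      match seen.get? n with
      | some v => ans ++ [v]
      | none => ans) acc = acc ++ l.map f := by
  induction l generalizing acc with
  | nil => simp
  | cons a t ih =>
    rw [List.foldl_cons, hf a (List.mem_cons_self), List.map_cons]
    rw [ih (fun n hn => hf n (List.mem_cons_of_mem a hn))]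
    simp

-- ===== VERDICT (by name: the statement is the Claim_ definition above) =====
theorem smaller_than_current_spec : Claim_equal_smaller_than_current := by
  intro nums _
  unfold Spec_smaller_than_current smaller_than_current smaller_than_current_alt
  set temp := PySem.List.sorted nums (fun x => x) false with htemp
  have hperm : temp.Perm nums := PySem.List.sorted_perm nums (fun x => x) false
  have hpair : temp.Pairwise (· ≤ ·) := PySem.List.sorted_pairwise nums (fun x => x)
  rw [foldl_append_eq_map nums _ (fun n => (nums.countP (fun m => decide (m < n)) : Nat))]
  · rw [List.nil_append]
    apply List.map_congr_left
    intro n _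
    rw [foldl_count_eq]
    simp
  · intro n hn
    have hnt : n ∈ temp := hperm.mem_iff.mpr hn
    rw [seenFold_get?]
    simp only [hnt, PySem.Dict.contains_empty, and_self, if_true, true_and]
    rw [idxOf_sorted_eq_countP temp hpair n hnt, hperm.countP_eq]
    simp
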